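-- pv_equiv track=rewrite | github.com/stalj/pp1 | 04-Subroutines/36.py | f
-- ===== SOURCE A (Python) =====
-- def f(detector: str):
--     number = 0
--     for iteration in detector:
--         if iteration == "+":
--             number += 1
--             if number == 3:
--                 break
--             if iteration == len(detector):
--                 break
--         elif iteration == "-":
--             number -= 1
--             if iteration == len(detector):
--                 break
--     if number >= 3:
--         return True
--     else:
--         return False
-- ===== SOURCE B (Python) =====
-- def f(detector: str):
--     weights = [1 if c == "+" else -1 if c == "-" else 0 for c in detector]
--     prefix = 0
--     sums = []
--     for w in weights:
--         prefix += w
--         sums.append(prefix)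
--     return max(sums, default=0) >= 3
-- ===== Notes on version B (the rewrite author's own statement) =====
-- stated objective: alternative
-- what changed: Replaces the early-break stateful counter loop with a map to +1/-1/0 weights, a prefix-sum pass, and a final max(sums, default=0) >= 3 test.
import Mathlib
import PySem

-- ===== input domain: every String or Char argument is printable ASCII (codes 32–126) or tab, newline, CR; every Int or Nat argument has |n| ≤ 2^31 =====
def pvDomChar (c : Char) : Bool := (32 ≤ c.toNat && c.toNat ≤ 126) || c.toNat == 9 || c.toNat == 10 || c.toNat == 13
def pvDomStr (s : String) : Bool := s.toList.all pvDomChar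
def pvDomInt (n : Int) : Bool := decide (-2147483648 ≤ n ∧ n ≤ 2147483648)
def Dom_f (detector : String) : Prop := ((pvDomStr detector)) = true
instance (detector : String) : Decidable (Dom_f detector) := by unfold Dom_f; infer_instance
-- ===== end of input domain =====

-- B recomputes the result as a prefix-sum maximum instead of A's early-break counter loop (alternative decomposition, same cost).

-- ===== PORT A =====
-- A's loop; the inner 'if iteration == len(detector): break' compares a str with an int,
-- which is always False in Python 3, so it is ported as a no-op.
def fLoop : List Char → Int → Int
  | [], number => number
  | c :: cs, number =>
    if c = '+' then
      let number := number + 1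
      if number = 3 then number else fLoop cs number
    else if c = '-' then
      fLoop cs (number - 1)
    else
      fLoop cs number

def f (detector : String) : Bool :=
  decide (fLoop detector.toList 0 ≥ 3)

-- ===== PORT B =====
def fWeight (c : Char) : Int := if c = '+' then 1 else if c = '-' then -1 else 0

-- the prefix-sum pass of Source B (running 'prefix', appended front-to-back)
def fAccum : List Int → Int → List Int
  | [], _ => []
  | w :: ws, prefix_ => (prefix_ + w) :: fAccum ws (prefix_ + w)

def f_alt (detector : String) : Bool :=
  decide (3 ≤ (PySem.List.max? (fAccum (detector.toList.map fWeight) 0) (fun y => y)).getD 0)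

-- ===== PRECONDITION & SPEC =====
def Spec_f (detector : String) (out : Bool) : Prop := out = f_alt detector
instance (detector : String) (out : Bool) : Decidable (Spec_f detector out) := by unfold Spec_f; infer_instance

-- ===== CLAIM (what is proved, stated in full; the proofs are below) =====
def Claim_equal_f : Prop := ∀ (detector : String), Dom_f detector → Spec_f detector (f detector)

-- ===== LEMMAS AND PROOFS =====

-- maximum of the running values (nonempty prefixes; p itself as fallback for [])
def fBest : List Int → Int → Int
  | [], p => p
  | w :: ws, p => max (p + w) (fBest ws (p + w))

theorem fAccum_foldl_max (ws : List Int) (q a : Int) (h : q ≤ a) :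
    (fAccum ws q).foldl max a = max a (fBest ws q) := by
  induction ws generalizing q a with
  | nil => simp [fAccum, fBest]; omega
  | cons w ws ih =>
    simp only [fAccum, fBest, List.foldl_cons]
    rw [ih (q + w) (max a (q + w)) (le_max_right _ _)]
    omega

theorem fMax_eq_best (ws : List Int) (p : Int) :
    (PySem.List.max? (fAccum ws p) (fun y => y)).getD p = fBest ws p := by
  cases ws with
  | nil => simp [fAccum, fBest, PySem.List.max?]
  | cons w ws =>
    simp only [fAccum, fBest, PySem.List.max?_id_cons, Option.getD_some]
    exact fAccum_foldl_max ws (p + w) (p + w) le_rfl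

theorem fLoop_iff_best (cs : List Char) (n : Int) (hn : n < 3) :
    (fLoop cs n ≥ 3) ↔ (3 ≤ fBest (cs.map fWeight) n) := by
  induction cs generalizing n with
  | nil => simp [fLoop, fBest]
  | cons c cs ih =>
    by_cases hp : c = '+'
    · subst hp
      by_cases h3 : n + 1 = 3
      · simp [fLoop, fBest, fWeight, h3]
      · simp only [fLoop, List.map_cons, fBest, fWeight]
        simp only [if_neg h3]
        simp [ih (n + 1) (by omega)]
        omega
    · by_cases hm : c = '-'
      · subst hm
        simp only [fLoop, List.map_cons, fBest, fWeight]
        simp only [show (('-' : Char) = '+') = False from by decide, if_false, if_true]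
        rw [show n - 1 = n + -1 from by ring, ih (n + -1) (by omega)]
        omega
      · simp only [fLoop, List.map_cons, fBest, fWeight, if_neg hp, if_neg hm]
        rw [add_zero, ih n hn]
        omega

-- ===== VERDICT (by name: the statement is the Claim_ definition above) =====
theorem f_spec : Claim_equal_f := by
  intro detector _
  unfold Spec_f f f_alt
  rw [fMax_eq_best]
  exact (decide_eq_decide).mpr (fLoop_iff_best detector.toList 0 (by norm_num))
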